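-- pv_equiv track=rewrite | github.com/NicolasNin/sc2-guessplayer | src/classifymatrix.py | reorganizeMatrix
-- ===== SOURCE A (Python) =====
-- def reorganizeMatrix(matrix,source,group):
-- 	newm=[]
-- 	news=[]
-- 	for s in source:
-- 		news.append(s)
-- 	for g1 in group:
-- 		for i in g1:
-- 			l=[]
-- 			for g2 in group:
-- 				for j in g2:
-- 					l.append(matrix[i][j])
-- 			newm.append(l)
-- 	return (newm,news)
-- ===== SOURCE B (Python) =====
-- def reorganizeMatrix(matrix, source, group):
--     order = [i for g in group for i in g]
--     cols = [[matrix[i][j] for i in order] for j in order]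
--     newm = [list(row) for row in zip(*cols)]
--     return (newm, list(source))
-- ===== Notes on version B (the rewrite author's own statement) =====
-- stated objective: alternative
-- what changed: B builds the reordered matrix column-by-column (transposed traversal over the flattened permutation) and transposes it back with zip(*), instead of A's row-major four-deep nested loops over the group structure.
import Mathlib
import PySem

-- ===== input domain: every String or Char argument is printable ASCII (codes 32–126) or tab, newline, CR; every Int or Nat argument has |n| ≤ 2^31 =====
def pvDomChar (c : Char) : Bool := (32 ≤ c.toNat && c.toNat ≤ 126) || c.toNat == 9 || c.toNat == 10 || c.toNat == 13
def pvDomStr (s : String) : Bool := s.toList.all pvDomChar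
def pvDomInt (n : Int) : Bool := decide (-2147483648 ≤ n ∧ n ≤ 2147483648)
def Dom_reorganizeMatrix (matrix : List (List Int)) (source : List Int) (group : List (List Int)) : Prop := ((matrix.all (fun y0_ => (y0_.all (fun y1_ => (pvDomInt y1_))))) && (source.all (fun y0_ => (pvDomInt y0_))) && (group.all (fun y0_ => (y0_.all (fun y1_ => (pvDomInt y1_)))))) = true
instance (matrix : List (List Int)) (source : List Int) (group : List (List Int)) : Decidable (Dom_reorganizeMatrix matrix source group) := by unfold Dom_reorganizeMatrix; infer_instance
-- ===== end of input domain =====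

-- B traverses the permuted matrix column-first and transposes the result back with zip(*),
-- instead of A's row-major four-deep nested loops (objective: alternative traversal).
-- matrix[i][j] (Python index, negative wrap): total form used by both ports; Pre_ guards range.
def pvEntry (matrix : List (List Int)) (i j : Int) : Int :=
  PySem.List.pyGetD (PySem.List.pyGetD matrix i []) j 0

-- ===== PORT A =====
def reorganizeMatrix (matrix : List (List Int)) (source : List Int) (group : List (List Int)) : List (List Int) × List Int :=
  let news := source.foldl (fun acc s => acc ++ [s]) []
  let newm := group.foldl (fun nm g1 =>
    g1.foldl (fun nm i =>
      nm ++ [group.foldl (fun l g2 =>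
        g2.foldl (fun l j => l ++ [pvEntry matrix i j]) l) []]) nm) []
  (newm, news)

-- ===== PORT B =====
-- Python zip(*ls): stop at the first exhausted row; exact for zip over lists of lists.
def pyZipStar (ls : List (List Int)) : List (List Int) :=
  if hls : ls = [] then []
  else if h : ls.any (fun r => r.isEmpty) then []
  else (ls.map (fun r => r.headD 0)) :: pyZipStar (ls.map (fun r => r.tail))
termination_by (ls.headD []).length
decreasing_by
  cases ls with
  | nil => exact absurd rfl hls
  | cons a t =>
    simp only [List.any_cons, Bool.or_eq_true, not_or] at h
    cases a with
    | nil => simp at h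
    | cons x xs => simp

def reorganizeMatrix_alt (matrix : List (List Int)) (source : List Int) (group : List (List Int)) : List (List Int) × List Int :=
  let order := group.flatMap id
  let cols := order.map (fun j => order.map (fun i => pvEntry matrix i j))
  let newm := pyZipStar cols
  (newm, source)

-- ===== PRECONDITION & SPEC =====
-- Pre_ excludes exactly the inputs where Python A raises IndexError: some flattened group
-- index out of range for matrix rows, or for the row it indexes into.
def Pre_reorganizeMatrix (matrix : List (List Int)) (source : List Int) (group : List (List Int)) : Prop :=
  ∀ i ∈ group.flatMap id, PySem.Raise.InRange matrix.length i ∧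
    ∀ j ∈ group.flatMap id, PySem.Raise.InRange (PySem.List.pyGetD matrix i []).length j
instance (matrix : List (List Int)) (source : List Int) (group : List (List Int)) : Decidable (Pre_reorganizeMatrix matrix source group) := by unfold Pre_reorganizeMatrix; infer_instance

def pvWitness_reorganizeMatrix : List (List Int) × List Int × List (List Int) :=
  ([[1, 2], [3, 4]], [10, 20], [[1], [0]])

def Spec_reorganizeMatrix (matrix : List (List Int)) (source : List Int) (group : List (List Int)) (out : List (List Int) × List Int) : Prop := out = reorganizeMatrix_alt matrix source group
instance (matrix : List (List Int)) (source : List Int) (group : List (List Int)) (out : List (List Int) × List Int) : Decidable (Spec_reorganizeMatrix matrix source group out) := by unfold Spec_reorganizeMatrix; infer_instance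

-- ===== CLAIM (what is proved, stated in full; the proofs are below) =====
def Claim_equal_reorganizeMatrix : Prop := ∀ (matrix : List (List Int)) (source : List Int) (group : List (List Int)), Dom_reorganizeMatrix matrix source group → Pre_reorganizeMatrix matrix source group → Spec_reorganizeMatrix matrix source group (reorganizeMatrix matrix source group)

-- ===== LEMMAS AND PROOFS =====

theorem foldl_copy (xs : List Int) (a : List Int) :
    xs.foldl (fun acc s => acc ++ [s]) a = a ++ xs := by
  induction xs generalizing a with
  | nil => simp
  | cons x xs ih => simp [ih]

theorem foldl_append_singleton' {α β : Type} (f : α → β) (xs : List α) (a : List β) :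
    xs.foldl (fun l j => l ++ [f j]) a = a ++ xs.map f := by
  induction xs generalizing a with
  | nil => simp
  | cons x xs ih => simp [ih]

theorem foldl_append_map {α β : Type} (f : α → β) (gs : List (List α)) (a : List β) :
    gs.foldl (fun l g => g.foldl (fun l j => l ++ [f j]) l) a
      = a ++ (gs.flatMap id).map f := by
  induction gs generalizing a with
  | nil => simp
  | cons g gs ih =>
    rw [List.foldl_cons, foldl_append_singleton' f g a, ih]
    simp [List.append_assoc]

-- zip(*) of a rectangular column-major map-of-maps is the row-major map-of-maps.
theorem zipStar_mapmap (f : Int → Int → Int) (xs ys : List Int) (hxs : xs ≠ []) :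
    pyZipStar (xs.map (fun j => ys.map (fun i => f i j)))
      = ys.map (fun i => xs.map (fun j => f i j)) := by
  induction ys with
  | nil =>
    rw [pyZipStar]
    cases xs with
    | nil => exact absurd rfl hxs
    | cons x xt => simp
  | cons i ys ih =>
    rw [pyZipStar]
    have hne : xs.map (fun j => (i :: ys).map (fun i => f i j)) ≠ [] := by
      simpa using hxs
    rw [dif_neg hne]
    have hnoempty : (xs.map (fun j => (i :: ys).map (fun i => f i j))).any (fun r => r.isEmpty) = false := by
      simp [List.any_map, Function.comp]
    rw [dif_neg (by simp [hnoempty])]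
    simp only [List.map_map, Function.comp_def, List.map_cons, List.headD_cons, List.tail_cons]
    rw [ih]

-- ===== VERDICT (by name: the statement is the Claim_ definition above) =====
theorem reorganizeMatrix_spec : Claim_equal_reorganizeMatrix := by
  intro matrix source group _ _
  unfold Spec_reorganizeMatrix reorganizeMatrix reorganizeMatrix_alt
  refine Prod.ext ?_ ?_
  · show group.foldl (fun nm g1 => g1.foldl
        (fun nm i => nm ++ [group.foldl (fun l g2 =>
          g2.foldl (fun l j => l ++ [pvEntry matrix i j]) l) []]) nm) []
      = pyZipStar ((group.flatMap id).map (fun j => (group.flatMap id).map (fun i => pvEntry matrix i j)))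
    rw [foldl_append_map]
    simp only [List.nil_append]
    rcases eq_or_ne (group.flatMap id) [] with h | h
    · rw [h]; rw [pyZipStar]; simp
    · rw [zipStar_mapmap (pvEntry matrix) _ _ h]
      congr 1
      funext i
      rw [foldl_append_map]
      simp
  · show source.foldl (fun acc s => acc ++ [s]) [] = source
    rw [foldl_copy]; simp
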